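-- pv_equiv track=rewrite | github.com/Ounaye/TAL_ApprentissageComposition_NADJ | code_3/makeTrainTestFile.py | getWordInLine
-- ===== SOURCE A (Python) =====
-- def getWordInLine(line):
--     word = ""
--     lastWord = False
--     indexLastWord = 0
--     for i in range(len(line)):
--         if(not(lastWord) and not(line[i] == " ")):
--             lastWord = True
--             indexLastWord = i
--             continue
--         if(lastWord and line[i] == "-"):
--             word = line[indexLastWord:]
--             break
--         if(lastWord and line[i] == " "):
--             lastWord = False
--
--     word = line[indexLastWord:]
--     return word
-- ===== SOURCE B (Python) =====
-- def getWordInLine(line):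
--     idx = 0
--     i, n = 0, len(line)
--     while i < n:
--         if line[i] == " ":
--             i += 1
--             continue
--         j = i + 1
--         while j < n and line[j] != " ":
--             j += 1
--         idx = i
--         if "-" in line[i + 1:j]:
--             break
--         i = j
--     return line[idx:]
-- ===== Notes on version B (the rewrite author's own statement) =====
-- stated objective: alternative
-- what changed: Replaces the character-by-character state machine (lastWord flag) with a two-pointer tokenizer that scans maximal space-free runs and stops at the first word containing '-' past its first character.
import Mathlib
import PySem

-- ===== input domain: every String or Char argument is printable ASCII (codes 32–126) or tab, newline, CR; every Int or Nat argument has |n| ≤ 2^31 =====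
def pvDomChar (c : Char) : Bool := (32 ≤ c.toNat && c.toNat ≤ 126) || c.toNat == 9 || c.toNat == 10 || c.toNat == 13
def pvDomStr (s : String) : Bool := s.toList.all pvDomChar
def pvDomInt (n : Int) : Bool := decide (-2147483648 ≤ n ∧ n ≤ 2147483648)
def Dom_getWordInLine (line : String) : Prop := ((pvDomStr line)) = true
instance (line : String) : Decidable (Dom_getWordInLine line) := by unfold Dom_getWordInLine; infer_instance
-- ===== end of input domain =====

-- B replaces A's per-character state machine (lastWord flag) with a two-pointer tokenizer
-- over maximal space-free runs; alternative decomposition, same O(n) cost.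

-- ===== PORT A =====
-- A's loop over range(len(line)) with state (lastWord, indexLastWord); 'break' returns the
-- current indexLastWord (A's final 'word = line[indexLastWord:]' overwrites the break value
-- with the same slice, so the loop's result is just the index).
def goA : List Char → Nat → Bool → Nat → Nat
  | [], _, _, idx => idx
  | c :: rest, i, lastWord, idx =>
    if !lastWord && !(c == ' ') then goA rest (i+1) true i
    else if lastWord && c == '-' then idx
    else if lastWord && c == ' ' then goA rest (i+1) false idx
    else goA rest (i+1) lastWord idx

-- line[idx:] with 0 ≤ idx is exactly List.drop on the code points
def getWordInLine (line : String) : String :=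
  String.ofList ((line.toList).drop (goA line.toList 0 false 0))

-- ===== PORT B =====
-- Source B's outer while: skip a space, or scan the word [i, j) with the inner while
-- (takeWhile/dropWhile on the characters after the first), test '-' in line[i+1:j], break or
-- continue from j.
def goB : List Char → Nat → Nat → Nat
  | [], _, idx => idx
  | c :: rest, i, idx =>
    if c == ' ' then goB rest (i+1) idx
    else
      let w := rest.takeWhile (fun d => !(d == ' '))
      if '-' ∈ w then i
      else goB (rest.dropWhile (fun d => !(d == ' '))) (i + 1 + w.length) i
termination_by cs _ _ => cs.length
decreasing_by simp; exact Nat.lt_succ_of_le (List.length_dropWhile_le _ _)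

def getWordInLine_alt (line : String) : String :=
  String.ofList ((line.toList).drop (goB line.toList 0 0))

-- ===== PRECONDITION & SPEC =====
def Spec_getWordInLine (line : String) (out : String) : Prop := out = getWordInLine_alt line
instance (line : String) (out : String) : Decidable (Spec_getWordInLine line out) := by unfold Spec_getWordInLine; infer_instance

-- ===== CLAIM (what is proved, stated in full; the proofs are below) =====
def Claim_equal_getWordInLine : Prop := ∀ (line : String), Dom_getWordInLine line → Spec_getWordInLine line (getWordInLine line)

-- ===== LEMMAS AND PROOFS =====

-- Inside a word (no spaces in w): A scans it char by char; it returns s at the first '-',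
-- otherwise continues after the word with lastWord still true.
theorem goA_word (w : List Char) (h : ∀ c ∈ w, c ≠ ' ') (rest : List Char) (i s : Nat) :
    goA (w ++ rest) i true s = if '-' ∈ w then s else goA rest (i + w.length) true s := by
  induction w generalizing i with
  | nil => simp
  | cons c w' ih =>
    have hc : c ≠ ' ' := h c (by simp)
    by_cases hd : c = '-'
    · subst hd; simp [goA]
    · have : goA ((c :: w') ++ rest) i true s = goA (w' ++ rest) (i+1) true s := by
        simp [goA, hc, hd]
      rw [this, ih (fun d hd' => h d (by simp [hd'])),
        show i + 1 + w'.length = i + (c :: w').length from by simp; omega]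
      have hnc : ¬('-' = c) := fun h => hd h.symm
      simp [List.mem_cons, hnc]

theorem goA_eq_goB (n : Nat) : ∀ (cs : List Char), cs.length ≤ n → ∀ (i idx : Nat),
    goA cs i false idx = goB cs i idx := by
  induction n with
  | zero =>
    intro cs h i idx
    have : cs = [] := List.eq_nil_of_length_eq_zero (Nat.le_zero.mp h)
    subst this; simp [goA, goB]
  | succ n ih =>
    intro cs h i idx
    match cs with
    | [] => simp [goA, goB]
    | c :: rest =>
      by_cases hc : c = ' '
      · subst hc
        have hA : goA (' ' :: rest) i false idx = goA rest (i+1) false idx := by simp [goA]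
        have hB : goB (' ' :: rest) i idx = goB rest (i+1) idx := by simp [goB]
        rw [hA, hB]; exact ih rest (by simpa using Nat.le_of_succ_le_succ h) (i+1) idx
      · -- start of a word at index i
        set w := rest.takeWhile (fun d => !(d == ' ')) with hw
        have hsplit : rest = w ++ rest.dropWhile (fun d => !(d == ' ')) :=
          (List.takeWhile_append_dropWhile (p := fun d => !(d == ' ')) (l := rest)).symm
        have hwns : ∀ d ∈ w, d ≠ ' ' := by
          intro d hd
          have := List.mem_takeWhile_imp (hw ▸ hd)
          simpa using this
        have hA1 : goA (c :: rest) i false idx = goA rest (i+1) true i := by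
          simp [goA, hc]
        have hA2 : goA rest (i+1) true i
            = if '-' ∈ w then i else goA (rest.dropWhile (fun d => !(d == ' '))) (i + 1 + w.length) true i := by
          conv_lhs => rw [hsplit]
          rw [goA_word w hwns _ (i+1) i]
        have hB1 : goB (c :: rest) i idx
            = if '-' ∈ w then i else goB (rest.dropWhile (fun d => !(d == ' '))) (i + 1 + w.length) i := by
          conv_lhs => rw [goB]
          rw [if_neg (by simp [hc])]
        rw [hA1, hA2, hB1]
        by_cases hdash : '-' ∈ w
        · simp [hdash]
        · simp only [hdash, if_false]
          -- the dropped tail is [] or starts with ' '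
          match hdw : rest.dropWhile (fun d => !(d == ' ')) with
          | [] => simp [goA, goB]
          | d :: rest' =>
            have hd : d = ' ' := by
              have := List.head_dropWhile_not (p := fun d => !(d == ' ')) (l := rest) (by simp [hdw])
              simpa [hdw] using this
            subst hd
            have hA3 : goA (' ' :: rest') (i + 1 + w.length) true i
                = goA rest' (i + 1 + w.length + 1) false i := by simp [goA]
            have hB3 : goB (' ' :: rest') (i + 1 + w.length) i
                = goB rest' (i + 1 + w.length + 1) i := by simp [goB]
            rw [hA3, hB3]
            apply ih
            have h1 : rest.length ≤ n := by simpa using Nat.le_of_succ_le_succ h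
            have h2 : (rest.dropWhile (fun d => !(d == ' '))).length ≤ rest.length :=
              List.length_dropWhile_le _ _
            rw [hdw] at h2
            simp at h2
            omega

-- ===== VERDICT (by name: the statement is the Claim_ definition above) =====
theorem getWordInLine_spec : Claim_equal_getWordInLine := by
  intro line _
  unfold Spec_getWordInLine getWordInLine getWordInLine_alt
  rw [goA_eq_goB line.toList.length line.toList le_rfl 0 0]
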